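-- pv_equiv track=rewrite | github.com/GlacyalWolf/programingAlgoritms2 | Exams/Examen2_2021/repetedShortWords.py | repeated_short
-- ===== SOURCE A (Python) =====
-- def repeated_short(lw):
--     '''
--     >>> repeated_short(['easy','come','easy','go','will','you','let','me','go'])
--     ['easy', 'go']
--     >>> repeated_short(['I','can','see','it','can','you','see','it'])
--     ['can', 'it', 'see']
--     >>> repeated_short(['unbelievable','unbelievable'])
--     []
--     '''
--     listaWord = []
--     n = 1
--     for i in lw:
--         for x in range(n, len(lw)):
--             if(i == lw[x] and i not in listaWord and len(i) < 5):
--                 listaWord.append(i)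
--         n += 1
--
--     return sorted(listaWord)
-- ===== SOURCE B (Python) =====
-- def repeated_short(lw):
--     res = []
--     prev = None
--     for w in sorted(lw):
--         if w == prev and len(w) < 5 and (not res or res[-1] != w):
--             res.append(w)
--         prev = w
--     return res
-- ===== Notes on version B (the rewrite author's own statement) =====
-- stated objective: faster
-- what changed: Replaced the quadratic nested pairwise duplicate search (with a linear 'not in' membership test inside the inner loop) by a single adjacency scan over a sorted copy of the list, which yields the sorted deduplicated result directly.
import Mathlib
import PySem

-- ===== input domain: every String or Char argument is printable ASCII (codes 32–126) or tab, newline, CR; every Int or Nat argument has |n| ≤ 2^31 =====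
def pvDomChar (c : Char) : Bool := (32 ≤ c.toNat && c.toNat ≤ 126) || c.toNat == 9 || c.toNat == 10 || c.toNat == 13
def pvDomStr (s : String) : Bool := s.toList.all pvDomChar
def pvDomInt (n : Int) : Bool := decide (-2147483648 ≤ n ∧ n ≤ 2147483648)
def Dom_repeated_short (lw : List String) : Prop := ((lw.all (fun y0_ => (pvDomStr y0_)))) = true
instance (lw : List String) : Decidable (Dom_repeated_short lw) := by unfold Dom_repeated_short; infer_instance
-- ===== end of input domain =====

-- B replaces A's nested quadratic duplicate search by one adjacency scan over a sorted copy.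

-- ===== PORT A =====
-- for i in lw (n counts from 1): for x in range(n, len(lw)): append i if repeated, unseen, short; return sorted
def repeated_short (lw : List String) : List String :=
  let listaWord :=
    (lw.foldl (fun (st : List String × Int) i =>
        ((PySem.List.pyRange st.2 (PySem.List.len lw) 1).foldl
           (fun acc x =>
             if i = PySem.List.pyGetD lw x "" ∧ i ∉ acc ∧ PySem.Str.len i < 5 then
               acc ++ [i]
             else acc) st.1,
         st.2 + 1)) ([], 1)).1
  PySem.List.sorted listaWord (fun x => x) false

-- ===== PORT B =====
-- adjacency scan over sorted(lw) with a running prev and a last-appended suppression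
def repeated_short_alt (lw : List String) : List String :=
  ((PySem.List.sorted lw (fun x => x) false).foldl
     (fun (st : List String × Option String) w =>
        (if some w = st.2 ∧ PySem.Str.len w < 5 ∧
              (st.1 = [] ∨ ¬ PySem.List.pyGet? st.1 (-1) = some w) then
           st.1 ++ [w]
         else st.1,
         some w)) ([], none)).1

-- ===== PRECONDITION & SPEC =====
def Spec_repeated_short (lw : List String) (out : List String) : Prop := out = repeated_short_alt lw
instance (lw : List String) (out : List String) : Decidable (Spec_repeated_short lw out) := by unfold Spec_repeated_short; infer_instance

-- ===== CLAIM (what is proved, stated in full; the proofs are below) =====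
def Claim_equal_repeated_short : Prop := ∀ (lw : List String), Dom_repeated_short lw → Spec_repeated_short lw (repeated_short lw)

-- ===== LEMMAS AND PROOFS =====

-- A's collection phase, restructured: at the outer step with current element w,
-- the inner range scan runs over the elements after w.
def pvAuxA (cur acc : List String) : List String :=
  match cur with
  | [] => acc
  | w :: rest =>
      pvAuxA rest
        (rest.foldl (fun acc x =>
          if w = x ∧ w ∉ acc ∧ PySem.Str.len w < 5 then acc ++ [w] else acc) acc)

theorem pvInnerA_of_mem (w : String) (rest acc : List String) (h : w ∈ acc) :
    rest.foldl (fun acc x =>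
      if w = x ∧ w ∉ acc ∧ PySem.Str.len w < 5 then acc ++ [w] else acc) acc = acc := by
  induction rest with
  | nil => rfl
  | cons x rest ih =>
      simp only [List.foldl_cons]
      rw [if_neg (by tauto), ih]

theorem pvInnerA_eq (w : String) (rest : List String) : ∀ acc : List String,
    rest.foldl (fun acc x =>
      if w = x ∧ w ∉ acc ∧ PySem.Str.len w < 5 then acc ++ [w] else acc) acc =
    (if w ∈ rest ∧ w ∉ acc ∧ PySem.Str.len w < 5 then acc ++ [w] else acc) := by
  induction rest with
  | nil => intro acc; simp
  | cons x rest ih =>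
      intro acc
      simp only [List.foldl_cons]
      by_cases hx : w = x
      · subst hx
        by_cases hc : w ∉ acc ∧ PySem.Str.len w < 5
        · rw [if_pos ⟨rfl, hc⟩, pvInnerA_of_mem _ _ _ (by simp),
            if_pos ⟨by simp, hc⟩]
        · rw [if_neg (by tauto), ih, if_neg (by tauto), if_neg (by tauto)]
      · rw [if_neg (by tauto), ih]
        by_cases hw : w ∈ rest ∧ w ∉ acc ∧ PySem.Str.len w < 5
        · rw [if_pos hw, if_pos ⟨List.mem_cons_of_mem _ hw.1, hw.2⟩]
        · rw [if_neg hw, if_neg (fun hc => hw ⟨(List.mem_cons.mp hc.1).resolve_left hx, hc.2⟩)]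

theorem pvOuterA_eq (lw : List String) :
    ∀ (cur pre acc : List String), lw = pre ++ cur →
    (cur.foldl (fun (st : List String × Int) i =>
        ((PySem.List.pyRange st.2 (PySem.List.len lw) 1).foldl
           (fun acc x =>
             if i = PySem.List.pyGetD lw x "" ∧ i ∉ acc ∧ PySem.Str.len i < 5 then
               acc ++ [i]
             else acc) st.1,
         st.2 + 1)) (acc, (pre.length : Int) + 1)).1 = pvAuxA cur acc := by
  intro cur
  induction cur with
  | nil => intro pre acc h; rfl
  | cons w rest ih =>
      intro pre acc h
      simp only [List.foldl_cons]
      have hdrop := PySem.List.foldl_pyRange_pyGetD lw ""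
        (fun acc x => if w = x ∧ w ∉ acc ∧ PySem.Str.len w < 5 then acc ++ [w] else acc)
        acc (a := (pre.length : Int) + 1) (by positivity)
      have hd : lw.drop ((pre.length : Int) + 1).toNat = rest := by
        subst h
        have h1 : ((pre.length : Int) + 1).toNat = (pre ++ [w]).length := by
          simp
        rw [h1, show pre ++ w :: rest = (pre ++ [w]) ++ rest by simp, List.drop_left]
      rw [hd] at hdrop
      beta_reduce at hdrop
      have hstep := ih (pre ++ [w])
        (rest.foldl (fun acc x =>
          if w = x ∧ w ∉ acc ∧ PySem.Str.len w < 5 then acc ++ [w] else acc) acc)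
        (by simp [h])
      simp only [List.length_append, List.length_cons, List.length_nil] at hstep
      rw [pvAuxA, ← hstep]
      have h2 : ((pre.length : Int) + 1) + 1 = (((pre.length + 1 : Nat)) : Int) + 1 := by
        push_cast; ring
      rw [hdrop, h2]

theorem pvAuxA_nodup (cur : List String) : ∀ acc : List String, acc.Nodup → (pvAuxA cur acc).Nodup := by
  induction cur with
  | nil => intro acc h; exact h
  | cons w rest ih =>
      intro acc h
      rw [pvAuxA, pvInnerA_eq]
      by_cases hc : w ∈ rest ∧ w ∉ acc ∧ PySem.Str.len w < 5
      · rw [if_pos hc]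
        refine ih _ (List.nodup_append.mpr ⟨h, List.nodup_singleton _, ?_⟩)
        intro a ha b hb
        rw [List.mem_singleton] at hb
        subst hb
        exact fun e => hc.2.1 (e ▸ ha)
      · rw [if_neg hc]; exact ih _ h

theorem pvAuxA_mem (cur : List String) : ∀ (acc : List String) (y : String),
    y ∈ pvAuxA cur acc ↔ y ∈ acc ∨ (PySem.Str.len y < 5 ∧ 2 ≤ cur.count y) := by
  induction cur with
  | nil => intro acc y; simp [pvAuxA]
  | cons w rest ih =>
      intro acc y
      rw [pvAuxA, pvInnerA_eq, ih]
      by_cases hyw : y = w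
      · subst hyw
        rw [List.count_cons_self]
        by_cases hy : y ∈ acc
        · rw [if_neg (fun hc => hc.2.1 hy)]
          simp [hy]
        · constructor
          · rintro (h | h)
            · split_ifs at h with hc
              · refine Or.inr ⟨hc.2.2, ?_⟩
                have := List.one_le_count_iff.mpr hc.1
                omega
              · exact absurd h hy
            · exact Or.inr ⟨h.1, by omega⟩
          · rintro (h | ⟨h1, h2⟩)
            · exact absurd h hy
            · have hmem : y ∈ rest := by
                rw [← List.one_le_count_iff]; omega
              rw [if_pos ⟨hmem, hy, h1⟩]
              exact Or.inl (by simp)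
      · have hyw' : y ≠ w := hyw
        rw [List.count_cons_of_ne (fun h => hyw h.symm)]
        split_ifs with hc
        · simp only [List.mem_append, List.mem_singleton]
          tauto
        · tauto

-- small facts about pyGet? at -1
theorem pvPyGet_neg_one {res : List String} (h : res ≠ []) :
    PySem.List.pyGet? res (-1) = res.getLast? := by
  have hn : 1 ≤ res.length := List.length_pos_iff.mpr h
  simp only [PySem.List.pyGet?, PySem.List.pyIdx?]
  rw [if_neg (by norm_num), if_pos (by omega)]
  simp [List.getLast?_eq_getElem?]

-- B's scan invariant: the accumulated list is strictly increasing and collects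
-- exactly the short words that are repeated in the remaining sorted input
-- (or currently adjacent via prev).
theorem pvScanB (s : List String) :
    ∀ (res : List String) (prev : Option String),
    s.Pairwise (· ≤ ·) →
    (∀ p, prev = some p → ∀ z ∈ s, p ≤ z) →
    res.Pairwise (· < ·) →
    (∀ y ∈ res, ∃ p, prev = some p ∧ y ≤ p) →
    ((s.foldl
       (fun (st : List String × Option String) w =>
          (if some w = st.2 ∧ PySem.Str.len w < 5 ∧
                (st.1 = [] ∨ ¬ PySem.List.pyGet? st.1 (-1) = some w) then
             st.1 ++ [w]
           else st.1,
           some w)) (res, prev)).1.Pairwise (· < ·) ∧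
     ∀ y, y ∈ (s.foldl
       (fun (st : List String × Option String) w =>
          (if some w = st.2 ∧ PySem.Str.len w < 5 ∧
                (st.1 = [] ∨ ¬ PySem.List.pyGet? st.1 (-1) = some w) then
             st.1 ++ [w]
           else st.1,
           some w)) (res, prev)).1 ↔
       y ∈ res ∨ (PySem.Str.len y < 5 ∧ ((prev = some y ∧ y ∈ s) ∨ 2 ≤ s.count y))) := by
  induction s with
  | nil =>
      intro res prev _ _ hres _
      refine ⟨hres, fun y => by simp⟩
  | cons w rest ih =>
      intro res prev hsort hprev hres hresPrev
      have hsort' : rest.Pairwise (· ≤ ·) := hsort.tail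
      have hwle : ∀ z ∈ rest, w ≤ z := fun z hz => (List.pairwise_cons.mp hsort).1 z hz
      -- under the invariant, the guard's last-element check says exactly w ∉ res
      have hlast : (some w = prev) → ((res = [] ∨ ¬ PySem.List.pyGet? res (-1) = some w) ↔ w ∉ res) := by
        intro hpe
        constructor
        · rintro (h | h) hmem
          · simp [h] at hmem
          · apply h
            have hle : ∀ y ∈ res, y ≤ w := by
              intro y hy
              obtain ⟨q, hq, hyq⟩ := hresPrev y hy
              rw [← hpe] at hq
              cases hq; exact hyq
            have hne : res ≠ [] := by rintro rfl; simp at hmem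
            have hl : res.getLast? = some w := by
              rcases List.eq_nil_or_concat res with h0 | ⟨l, z, h0⟩
              · exact absurd h0 hne
              · rw [h0, List.concat_eq_append, List.getLast?_concat]
                have hmem' : w ∈ l ∨ w = z := by
                  have := hmem; rw [h0, List.concat_eq_append] at this; simpa using this
                have hzw : z ≤ w := hle z (by rw [h0, List.concat_eq_append]; simp)
                have hres2 : (l ++ [z]).Pairwise (· < ·) := by
                  rw [← List.concat_eq_append, ← h0]; exact hres
                have hwz : w ≤ z := by
                  rcases hmem' with h' | h'
                  · exact le_of_lt ((List.pairwise_append.mp hres2).2.2 w h' z (by simp))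
                  · exact le_of_eq h'
                rw [le_antisymm hzw hwz]
            rw [pvPyGet_neg_one hne, hl]
        · intro hnm
          by_cases hn : res = []
          · exact Or.inl hn
          · refine Or.inr ?_
            rw [pvPyGet_neg_one hn]
            intro hg
            exact hnm (List.mem_of_getLast? hg)
      simp only [List.foldl_cons]
      by_cases hguard : some w = prev ∧ PySem.Str.len w < 5 ∧
          (res = [] ∨ ¬ PySem.List.pyGet? res (-1) = some w)
      · -- w is appended
        rw [if_pos hguard]
        obtain ⟨hpe, hlen, hch⟩ := hguard
        have hwnotin : w ∉ res := (hlast hpe).mp hch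
        have hres' : (res ++ [w]).Pairwise (· < ·) := by
          rw [List.pairwise_append]
          refine ⟨hres, List.pairwise_singleton _ _, ?_⟩
          intro y hy w' hw'
          simp at hw'; subst hw'
          obtain ⟨p, hp, hyp⟩ := hresPrev y hy
          rw [← hpe] at hp; cases hp
          exact lt_of_le_of_ne hyp (fun h => hwnotin (h ▸ hy))
        have hih := ih (res ++ [w]) (some w) hsort'
          (by rintro p ⟨rfl⟩ z hz; exact hwle z hz)
          hres'
          (by intro y hy
              rcases List.mem_append.mp hy with h | h
              · obtain ⟨p, hp, hyp⟩ := hresPrev y h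
                rw [← hpe] at hp; cases hp
                exact ⟨w, rfl, hyp⟩
              · simp at h; exact ⟨w, rfl, h.le⟩)
        refine ⟨hih.1, fun y => ?_⟩
        rw [hih.2 y]
        by_cases hyw : y = w
        · subst hyw
          have m1 : y ∈ res ++ [y] := by simp
          have m2 : y ∈ y :: rest := by simp
          exact iff_of_true (Or.inl m1) (Or.inr ⟨hlen, Or.inl ⟨hpe.symm, m2⟩⟩)
        · rw [List.count_cons_of_ne (fun h => hyw h.symm)]
          have hms : (y ∈ res ++ [w]) ↔ y ∈ res := by simp [hyw]
          rw [hms]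
          constructor
          · rintro (h | ⟨h1, (⟨h2, h3⟩ | h2)⟩)
            · exact Or.inl h
            · cases h2; exact absurd rfl hyw
            · exact Or.inr ⟨h1, Or.inr h2⟩
          · rintro (h | ⟨h1, (⟨h2, h3⟩ | h2)⟩)
            · exact Or.inl h
            · rcases List.mem_cons.mp h3 with h3 | h3
              · exact absurd h3 hyw
              · have h4 : w ≤ y := hwle y h3
                have h5 : y ≤ w := hprev y h2 w (by simp)
                exact absurd (le_antisymm h5 h4) hyw
            · exact Or.inr ⟨h1, Or.inr h2⟩
      · rw [if_neg hguard]
        have hih := ih res (some w) hsort'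
          (by rintro p ⟨rfl⟩ z hz; exact hwle z hz)
          hres
          (by intro y hy
              obtain ⟨p, hp, hyp⟩ := hresPrev y hy
              exact ⟨w, rfl, le_trans hyp (hprev p hp w (by simp))⟩)
        refine ⟨hih.1, fun y => ?_⟩
        rw [hih.2 y]
        by_cases hyw : y = w
        · subst hyw
          rw [List.count_cons_self]
          constructor
          · rintro (h | ⟨h1, (⟨h2, h3⟩ | h2)⟩)
            · exact Or.inl h
            · refine Or.inr ⟨h1, Or.inr ?_⟩
              have := List.one_le_count_iff.mpr h3
              omega
            · exact Or.inr ⟨h1, Or.inr (by omega)⟩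
          · rintro (h | ⟨h1, (⟨h2, h3⟩ | h2)⟩)
            · exact Or.inl h
            · by_cases hmem : y ∈ res
              · exact Or.inl hmem
              · exact absurd ⟨h2.symm, h1, (hlast h2.symm).mpr hmem⟩ hguard
            · have hmr : y ∈ rest := by rw [← List.one_le_count_iff]; omega
              exact Or.inr ⟨h1, Or.inl ⟨rfl, hmr⟩⟩
        · rw [List.count_cons_of_ne (fun h => hyw h.symm)]
          constructor
          · rintro (h | ⟨h1, (⟨h2, h3⟩ | h2)⟩)
            · exact Or.inl h
            · cases h2; exact absurd rfl hyw
            · exact Or.inr ⟨h1, Or.inr h2⟩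
          · rintro (h | ⟨h1, (⟨h2, h3⟩ | h2)⟩)
            · exact Or.inl h
            · rcases List.mem_cons.mp h3 with h3 | h3
              · exact absurd h3 hyw
              · have h4 : w ≤ y := hwle y h3
                have h5 : y ≤ w := hprev y h2 w (by simp)
                exact absurd (le_antisymm h5 h4) hyw
            · exact Or.inr ⟨h1, Or.inr h2⟩

-- ===== VERDICT (by name: the statement is the Claim_ definition above) =====
theorem repeated_short_spec : Claim_equal_repeated_short := by
  intro lw _
  unfold Spec_repeated_short repeated_short repeated_short_alt
  -- A's collected list
  have hA := pvOuterA_eq lw lw [] [] (by simp)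
  simp only [List.length_nil, Nat.cast_zero, zero_add] at hA
  rw [hA]
  -- B's scan over the sorted copy
  set s := PySem.List.sorted lw (fun x => x) false with hs
  have hsort : s.Pairwise (· ≤ ·) := PySem.List.sorted_pairwise lw (fun x => x)
  have hB := pvScanB s [] none hsort (by simp) (by simp) (by simp)
  -- set R := the scan result
  set R := ((s.foldl
       (fun (st : List String × Option String) w =>
          (if some w = st.2 ∧ PySem.Str.len w < 5 ∧
                (st.1 = [] ∨ ¬ PySem.List.pyGet? st.1 (-1) = some w) then
             st.1 ++ [w]
           else st.1,
           some w)) ([], none)).1) with hR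
  have hRlt : R.Pairwise (· < ·) := hB.1
  have hRmem : ∀ y, y ∈ R ↔ PySem.Str.len y < 5 ∧ 2 ≤ s.count y := by
    intro y
    rw [hB.2 y]
    simp
  have hRnodup : R.Nodup := hRlt.imp ne_of_lt
  have hLnodup : (pvAuxA lw []).Nodup := pvAuxA_nodup lw [] (by simp)
  have hLmem : ∀ y, y ∈ pvAuxA lw [] ↔ PySem.Str.len y < 5 ∧ 2 ≤ lw.count y := by
    intro y
    rw [pvAuxA_mem lw [] y]
    simp
  have hcount : ∀ y, s.count y = lw.count y := by
    intro y
    exact (PySem.List.sorted_perm lw (fun x => x) false).count_eq y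
  have hperm : R.Perm (pvAuxA lw []) := by
    rw [List.perm_ext_iff_of_nodup hRnodup hLnodup]
    intro y
    rw [hRmem y, hLmem y, hcount y]
  exact PySem.List.sorted_eq_of_perm_of_pairwise_lt (pvAuxA lw []) R (fun x => x) hperm hRlt
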